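-- pv_equiv track=rewrite | github.com/ZyMa-1/BeatmapBannerMakerCLI | tests/TestDataGenerator.py | generate_test_data_from_list
-- ===== SOURCE A (Python) =====
-- from typing import List, Dict
--
-- def generate_test_data_from_list(data: List[List[str]]) -> List[List[str]]:
--     """
--     Generates test data with O(n^2 * m), not O(m^n).
--     Just 1 test case for every parameter with whatever other arguments to check if that one parameter works fine.
--
--     For example: [[0, 1], [2, 3, 4]] -> [[0, 2], [1, 2], [0, 2], [0, 3], [0, 4]]
--     """
--     res_test_data = []
--     for i in range(len(data)):
--         for j in range(len(data[i])):
--             current_test_data = []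
--             for k in range(len(data)):
--                 if k != i:
--                     current_test_data.append(data[k][0])
--
--             current_test_data.insert(i, data[i][j])
--
--             res_test_data.append(current_test_data)
--
--     return res_test_data
-- ===== SOURCE B (Python) =====
-- from typing import List, Dict
--
-- def generate_test_data_from_list(data: List[List[str]]) -> List[List[str]]:
--     res = []
--     prefix = []  # first elements of the rows already passed
--     for idx, row in enumerate(data):
--         res += [prefix + [v] + [r[0] for r in data[idx + 1:]] for v in row]
--         prefix = prefix + row[:1]
--     return res
-- ===== Notes on version B (the rewrite author's own statement) =====
-- stated objective: alternative
-- what changed: A, for each cell (i,j), rebuilds the whole case with an inner loop over all rows plus list.insert at position i; B makes one structural left-to-right pass over the rows keeping a prefix accumulator of firsts and emits each case as prefix + [value] + suffix-firsts, with no per-case inner rebuild loop, no insert and no index overwrite.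
import Mathlib
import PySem

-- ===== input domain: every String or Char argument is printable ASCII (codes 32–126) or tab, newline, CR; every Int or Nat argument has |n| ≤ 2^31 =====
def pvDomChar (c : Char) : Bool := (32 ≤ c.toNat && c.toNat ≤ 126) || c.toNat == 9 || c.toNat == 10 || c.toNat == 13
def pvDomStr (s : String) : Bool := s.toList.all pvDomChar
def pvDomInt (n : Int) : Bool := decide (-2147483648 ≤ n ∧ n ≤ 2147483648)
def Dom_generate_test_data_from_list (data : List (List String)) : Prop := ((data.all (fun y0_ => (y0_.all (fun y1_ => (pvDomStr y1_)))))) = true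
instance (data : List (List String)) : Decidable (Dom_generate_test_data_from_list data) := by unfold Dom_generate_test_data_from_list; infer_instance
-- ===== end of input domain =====

-- B replaces A's per-cell rebuild-with-insert by one structural pass over the rows with a
-- prefix accumulator of firsts (case = prefix + [value] + suffix-firsts); objective: alternative.

-- ===== PORT A =====
-- literal transliteration of A; data[k][0] / data[i][j] are in range on Pre_ (pyGetD default never used there)
def generate_test_data_from_list (data : List (List String)) : List (List String) :=
  (PySem.List.pyRange 0 (PySem.List.len data) 1).foldl (fun res_test_data i =>
    (PySem.List.pyRange 0 (PySem.List.len (PySem.List.pyGetD data i [])) 1).foldl (fun res_test_data j =>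
      let current_test_data : List String :=
        (PySem.List.pyRange 0 (PySem.List.len data) 1).foldl (fun cur k =>
          if k != i then cur ++ [PySem.List.pyGetD (PySem.List.pyGetD data k []) 0 ""] else cur) []
      let current_test_data :=
        PySem.List.insert current_test_data i (PySem.List.pyGetD (PySem.List.pyGetD data i []) j "")
      res_test_data ++ [current_test_data]) res_test_data) []

-- ===== PORT B =====
-- literal transliteration of Source B: one pass over enumerate(data); state = (prefix of firsts, result);
-- r[0] inside the comprehension is ported as pyGetD r 0 "" (in range on Pre_, where the
-- comprehension body is only evaluated with all suffix rows nonempty)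
def generate_test_data_from_list_alt (data : List (List String)) : List (List String) :=
  ((PySem.List.enumerate data 0).foldl
    (fun (st : List String × List (List String)) p =>
      (st.1 ++ PySem.List.slice p.2 none (some 1),
       st.2 ++ p.2.map (fun v =>
         st.1 ++ [v] ++ (PySem.List.slice data (some (p.1 + 1)) none).map
           (fun r => PySem.List.pyGetD r 0 ""))))
    ([], [])).2

-- ===== PRECONDITION & SPEC =====
-- Pre_ excludes exactly the inputs where Python A raises IndexError (some row empty while another
-- row is nonempty: data[k][0] is then read for an empty row k).
def Pre_generate_test_data_from_list (data : List (List String)) : Prop :=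
  (∀ r ∈ data, r ≠ []) ∨ (∀ r ∈ data, r = [])
instance (data : List (List String)) : Decidable (Pre_generate_test_data_from_list data) := by
  unfold Pre_generate_test_data_from_list; infer_instance

def pvWitness_generate_test_data_from_list : List (List String) := [["a"], ["b", "c"]]

def Spec_generate_test_data_from_list (data : List (List String)) (out : List (List String)) : Prop := out = generate_test_data_from_list_alt data
instance (data : List (List String)) (out : List (List String)) : Decidable (Spec_generate_test_data_from_list data out) := by unfold Spec_generate_test_data_from_list; infer_instance

-- ===== CLAIM (what is proved, stated in full; the proofs are below) =====
def Claim_equal_generate_test_data_from_list : Prop := ∀ (data : List (List String)), Dom_generate_test_data_from_list data → Pre_generate_test_data_from_list data → Spec_generate_test_data_from_list data (generate_test_data_from_list data)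

-- ===== LEMMAS AND PROOFS =====

-- the row of first elements
def pvBase (data : List (List String)) : List String :=
  data.map (fun r => PySem.List.pyGetD r 0 "")

-- B's loop body, named for the proofs (definitionally the lambda in the port)
def pvStep (data : List (List String))
    (st : List String × List (List String)) (p : Int × List String) :
    List String × List (List String) :=
  (st.1 ++ PySem.List.slice p.2 none (some 1),
   st.2 ++ p.2.map (fun v =>
     st.1 ++ [v] ++ (PySem.List.slice data (some (p.1 + 1)) none).map
       (fun r => PySem.List.pyGetD r 0 "")))

theorem pvAlt_eq (data : List (List String)) :
    generate_test_data_from_list_alt data =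
      ((PySem.List.enumerate data 0).foldl (pvStep data) ([], [])).2 := rfl

-- the common canonical form: case (i, v) = firsts with position i set to v
def pvCanon (data : List (List String)) : List (List String) :=
  (List.range data.length).flatMap (fun (i : Nat) =>
    (data.getD i []).map (fun v => (pvBase data).set i v))

theorem pvA_flat (data : List (List String)) :
    generate_test_data_from_list data =
      (List.range data.length).flatMap (fun (i : Nat) =>
        (List.range (PySem.List.pyGetD data (i : Int) []).length).map (fun (j : Nat) =>
          PySem.List.insert
            (((List.range data.length).filter (fun k => k ≠ i)).map
              (fun (k : Nat) => PySem.List.pyGetD (PySem.List.pyGetD data (k : Int) []) 0 ""))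
            (i : Int)
            (PySem.List.pyGetD (PySem.List.pyGetD data (i : Int) []) (j : Int) ""))) := by
  unfold generate_test_data_from_list
  simp only [PySem.List.len_eq, PySem.List.pyRange_zero_nat, List.foldl_map,
    PySem.List.foldl_append_if, PySem.List.foldl_append_singleton_eq_map,
    PySem.List.foldl_append_eq_flatMap, List.nil_append]
  apply List.flatMap_congr
  intro i _
  have hp : List.filter (fun (k : Nat) => (↑k : Int) != ↑i) (List.range data.length)
      = List.filter (fun k => decide (k ≠ i)) (List.range data.length) :=
    List.filter_congr (by intro k _; simp [bne, beq_eq_decide])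
  rw [hp]

-- filtering index i out of range n, then mapping, is eraseIdx i of the mapped range
theorem pvFilter_erase {α : Type} (f : Nat → α) (n i : Nat) (hi : i < n) :
    ((List.range n).filter (fun k => k ≠ i)).map f
      = (((List.range n).map f).eraseIdx i) := by
  induction n with
  | zero => omega
  | succ n ih =>
    rw [List.range_succ, List.filter_append, List.map_append, List.map_append]
    by_cases h : i = n
    · subst h
      have h1 : (List.range i).filter (fun k => k ≠ i) = List.range i := by
        apply List.filter_eq_self.mpr
        intro a ha
        simp only [List.mem_range] at ha
        simp only [decide_eq_true_eq]
        omega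
      have h2 : ([i].filter (fun k => k ≠ i)) = [] := by simp
      rw [h1, h2,
        List.eraseIdx_append_of_length_le (by simp)]
      simp
    · have hlt : i < n := by omega
      have h2 : ([n].filter (fun k => k ≠ i)) = [n] := by
        simp only [List.filter_cons, List.filter_nil, decide_eq_true_eq]
        rw [if_pos (by omega)]
      rw [h2, ih hlt,
        List.eraseIdx_append_of_lt_length (by simpa using hlt)]

theorem pvInsert_erase (b : List String) (i : Nat) (hi : i < b.length) (v : String) :
    PySem.List.insert (b.eraseIdx i) (i : Int) v = b.set i v := by
  rw [PySem.List.insert_natCast _ _ _ (by rw [List.length_eraseIdx_of_lt hi]; omega)]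
  rw [List.eraseIdx_eq_take_drop_succ]
  rw [List.take_append_of_le_length (by simp; omega), List.take_take]
  rw [List.drop_append_of_le_length (by simp; omega)]
  have : (List.take i b).drop i = [] := by simp
  rw [this, List.set_eq_take_append_cons_drop]
  simp [hi]

theorem pvMap_getD_range {α : Type} (xs : List α) (d : α) :
    (List.range xs.length).map (fun k => xs.getD k d) = xs := by
  apply List.ext_getElem (by simp)
  intro k h1 h2
  simp [List.getD_eq_getElem?_getD, List.getElem?_eq_getElem h2]

-- A equals the canonical form, unconditionally
theorem pvA_canon (data : List (List String)) :
    generate_test_data_from_list data = pvCanon data := by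
  rw [pvA_flat]
  apply List.flatMap_congr
  intro i hi
  have hin : i < data.length := List.mem_range.mp hi
  have hbase : ((List.range data.length).map
      (fun (k : Nat) => PySem.List.pyGetD (PySem.List.pyGetD data (k : Int) []) 0 ""))
      = pvBase data := by
    unfold pvBase
    simp only [PySem.List.pyGetD_natCast]
    rw [show (fun (k : Nat) => PySem.List.pyGetD (data.getD k []) 0 "")
        = (fun r => PySem.List.pyGetD r 0 "") ∘ (fun (k : Nat) => data.getD k []) from rfl,
      ← List.map_map, pvMap_getD_range]
  rw [pvFilter_erase _ _ _ hin, hbase]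
  rw [PySem.List.pyGetD_natCast]
  set row := data.getD i [] with hrow
  rw [show (fun (j : Nat) => PySem.List.insert ((pvBase data).eraseIdx i) (i : Int)
        (PySem.List.pyGetD row (j : Int) ""))
      = (fun v => PySem.List.insert ((pvBase data).eraseIdx i) (i : Int) v)
        ∘ (fun (j : Nat) => row.getD j "") from by
        funext j; simp,
    ← List.map_map, pvMap_getD_range]
  apply List.map_congr_left
  intro v _
  rw [pvInsert_erase _ _ (by simpa [pvBase] using hin)]

-- B's pass when every remaining row is empty: nothing is emitted
theorem pvB_empty (data : List (List String)) (rest : List (List String)) :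
    ∀ (c : Int) (pre : List String) (acc : List (List String)),
      (∀ r ∈ rest, r = []) →
      ((PySem.List.enumerate rest c).foldl (pvStep data) (pre, acc)).2 = acc := by
  induction rest with
  | nil => intro c pre acc _; rfl
  | cons row tail ih =>
    intro c pre acc h
    have hr : row = [] := h row (List.mem_cons_self ..)
    subst hr
    rw [PySem.List.enumerate_cons, List.foldl_cons]
    have hstep : pvStep data (pre, acc) (c, ([] : List String))
        = (pre ++ PySem.List.slice ([] : List String) none (some 1), acc) := by
      simp [pvStep]
    rw [hstep]
    exact ih (c + 1) _ acc (fun r hr => h r (List.mem_cons_of_mem _ hr))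

-- B's pass when every remaining row is nonempty: prefix-accumulator invariant
theorem pvB_main (data : List (List String)) (rest : List (List String)) :
    ∀ (c : Nat) (pre : List String) (acc : List (List String)),
      (∀ r ∈ rest, r ≠ []) →
      ((PySem.List.enumerate rest (c : Int)).foldl (pvStep data) (pre, acc)).2
        = acc ++ (List.range rest.length).flatMap (fun (i : Nat) =>
            (rest.getD i []).map (fun v =>
              (pre ++ pvBase (rest.take i)) ++ [v] ++ pvBase (data.drop (c + i + 1)))) := by
  induction rest with
  | nil => intro c pre acc _; simp
  | cons row tail ih =>
    intro c pre acc h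
    obtain ⟨rh, rt, rfl⟩ := List.exists_cons_of_ne_nil (h row (List.mem_cons_self ..))
    rw [PySem.List.enumerate_cons, List.foldl_cons]
    have hsl : PySem.List.slice data (some ((c : Int) + 1)) none = data.drop (c + 1) := by
      rw [show ((c : Int) + 1) = ((c + 1 : Nat) : Int) by push_cast; ring,
        PySem.List.slice_from_natCast]
    have hstep : pvStep data (pre, acc) ((c : Int), rh :: rt)
        = (pre ++ [rh],
           acc ++ (rh :: rt).map (fun v => pre ++ [v] ++ pvBase (data.drop (c + 1)))) := by
      simp only [pvStep, hsl, pvBase]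
      rfl
    rw [hstep, show ((c : Int) + 1) = ((c + 1 : Nat) : Int) by push_cast; ring]
    rw [ih (c + 1) (pre ++ [rh]) _ (fun r hr => h r (List.mem_cons_of_mem _ hr))]
    rw [List.append_assoc, List.length_cons, List.range_succ_eq_map,
      List.flatMap_cons, List.flatMap_map]
    congr 1
    congr 1
    · simp [pvBase]
    · apply List.flatMap_congr
      intro i _
      simp only [List.getD_cons_succ, List.take_succ_cons]
      have h1 : pvBase ((rh :: rt) :: tail.take i) = rh :: pvBase (tail.take i) := by
        simp only [pvBase, List.map_cons]
        congr 1
        simp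
      have harith : c + 1 + i + 1 = c + (i + 1) + 1 := by omega
      rw [h1, harith]
      simp [List.append_assoc]

-- B equals the canonical form when all rows are nonempty
theorem pvB_canon (data : List (List String)) (h : ∀ r ∈ data, r ≠ []) :
    generate_test_data_from_list_alt data = pvCanon data := by
  rw [pvAlt_eq, show (0 : Int) = ((0 : Nat) : Int) by norm_num,
    pvB_main data data 0 [] [] h, List.nil_append]
  unfold pvCanon
  apply List.flatMap_congr
  intro i hi
  have hin : i < data.length := List.mem_range.mp hi
  apply List.map_congr_left
  intro v _
  have ht : pvBase (data.take i) = (pvBase data).take i := by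
    simp [pvBase, List.map_take]
  have hd : pvBase (data.drop (0 + i + 1)) = (pvBase data).drop (i + 1) := by
    simp [pvBase, List.map_drop]
  have hlen : i < (pvBase data).length := by simpa [pvBase] using hin
  rw [ht, hd, List.set_eq_take_append_cons_drop, if_pos hlen]
  simp

-- ===== VERDICT (by name: the statement is the Claim_ definition above) =====
theorem generate_test_data_from_list_spec : Claim_equal_generate_test_data_from_list := by
  intro data _dom pre
  unfold Spec_generate_test_data_from_list
  rw [pvA_canon]
  rcases pre with h | h
  · exact (pvB_canon data h).symm
  · have hB : generate_test_data_from_list_alt data = [] := by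
      rw [pvAlt_eq]
      exact pvB_empty data data 0 [] [] h
    have hC : pvCanon data = [] := by
      apply List.flatMap_eq_nil_iff.mpr
      intro i hi
      have hin : i < data.length := List.mem_range.mp hi
      have : data.getD i [] = [] := by
        rw [List.getD_eq_getElem?_getD, List.getElem?_eq_getElem hin]
        exact h _ (List.getElem_mem hin)
      rw [this]; rfl
    rw [hB, hC]
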